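-- pv_equiv track=rewrite | github.com/Feahter/openclaw-tools | tools/github/github-to-skills.py | _extract_core_content
-- ===== SOURCE A (Python) =====
-- def _extract_core_content(readme_content):
--     """提取 README 核心内容"""
--     lines = readme_content.split("\n")
--     main_content = []
--     started = False
--
--     skip_patterns = ["Table of", "目录", "Install", "Start", "License"]
--
--     for line in lines:
--         if line.startswith("![") or line.startswith("[!"):
--             continue
--         if line.startswith("## ") and not started:
--             if not any(p in line for p in skip_patterns):
--                 started = True
--         if started:
--             main_content.append(line)
--
--     return "\n".join(main_content)
-- ===== SOURCE B (Python) =====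
-- SKIP_PATTERNS = ["Table of", "\u76ee\u5f55", "Install", "Start", "License"]
--
--
-- def _good_header(line):
--     return line.startswith("## ") and not any(p in line for p in SKIP_PATTERNS)
--
--
-- def _extract_core_content(readme_content):
--     """Locate the first real section header, then keep the non-image suffix."""
--     lines = readme_content.split("\n")
--     i = next((k for k, line in enumerate(lines) if _good_header(line)), None)
--     if i is None:
--         return ""
--     return "\n".join(
--         line for line in lines[i:]
--         if not (line.startswith("![") or line.startswith("[!"))
--     )
-- ===== Notes on version B (the rewrite author's own statement) =====
-- stated objective: alternative
-- what changed: Replaced the single stateful started-flag pass with a locate-then-filter decomposition: first find the index of the first real section-header line, then join the non-image lines of that suffix.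
import Mathlib
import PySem

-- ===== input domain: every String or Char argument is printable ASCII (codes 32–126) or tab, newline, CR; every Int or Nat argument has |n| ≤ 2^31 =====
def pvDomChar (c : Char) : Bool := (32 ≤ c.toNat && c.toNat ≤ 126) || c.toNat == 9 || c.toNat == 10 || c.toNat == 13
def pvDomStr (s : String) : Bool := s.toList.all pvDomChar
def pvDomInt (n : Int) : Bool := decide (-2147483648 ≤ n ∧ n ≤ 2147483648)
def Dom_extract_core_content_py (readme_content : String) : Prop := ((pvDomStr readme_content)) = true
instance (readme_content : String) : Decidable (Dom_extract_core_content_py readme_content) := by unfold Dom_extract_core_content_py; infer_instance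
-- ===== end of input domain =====

-- B keeps A's return value but uses a locate-then-filter decomposition instead of A's stateful flag pass.

-- ===== PORT A =====
-- one step of A's for-loop; state = (main_content, started)
def pvAStep (st : List String × Bool) (line : String) : List String × Bool :=
  if PySem.Str.startswith line "![" || PySem.Str.startswith line "[!" then st
  else
    let started :=
      if PySem.Str.startswith line "## " && !st.2 then
        if !(["Table of", "目录", "Install", "Start", "License"].any
              (fun p => PySem.Str.isIn p line)) then true else st.2
      else st.2
    if started then (st.1 ++ [line], started) else (st.1, started)

def extract_core_content_py (readme_content : String) : String :=
  let lines := (PySem.Str.split? readme_content "\n").getD []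
  let res := lines.foldl pvAStep ([], false)
  PySem.Str.join "\n" res.1

-- ===== PORT B =====
def pvGoodHeader (line : String) : Bool :=
  PySem.Str.startswith line "## " &&
    !(["Table of", "目录", "Install", "Start", "License"].any
        (fun p => PySem.Str.isIn p line))

def pvIsImage (line : String) : Bool :=
  PySem.Str.startswith line "![" || PySem.Str.startswith line "[!"

def extract_core_content_py_alt (readme_content : String) : String :=
  let lines := (PySem.Str.split? readme_content "\n").getD []
  match lines.findIdx? pvGoodHeader with
  | none => ""
  | some i => PySem.Str.join "\n" ((lines.drop i).filter (fun l => !pvIsImage l))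

-- ===== PRECONDITION & SPEC =====
def Spec_extract_core_content_py (readme_content : String) (out : String) : Prop := out = extract_core_content_py_alt readme_content
instance (readme_content : String) (out : String) : Decidable (Spec_extract_core_content_py readme_content out) := by unfold Spec_extract_core_content_py; infer_instance

-- ===== CLAIM (what is proved, stated in full; the proofs are below) =====
def Claim_equal_extract_core_content_py : Prop := ∀ (readme_content : String), Dom_extract_core_content_py readme_content → Spec_extract_core_content_py readme_content (extract_core_content_py readme_content)

-- ===== LEMMAS AND PROOFS =====

-- a section-header line is never an image line
theorem good_not_image (l : String) (h : PySem.Str.startswith l "## " = true) :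
    pvIsImage l = false := by
  have h3 : ("## ".toList) <+: l.toList := by
    have h' := h
    rw [PySem.Str.startswith_eq] at h'
    exact (PySem.Chars.startswith_iff _ _).mp h'
  obtain ⟨t, ht⟩ := h3
  have e1 : PySem.Str.startswith l "![" = false := by
    rw [PySem.Str.startswith_eq, Bool.eq_false_iff]
    intro hc
    obtain ⟨u, hu⟩ := (PySem.Chars.startswith_iff _ _).mp hc
    rw [← ht] at hu
    simp at hu
  have e2 : PySem.Str.startswith l "[!" = false := by
    rw [PySem.Str.startswith_eq, Bool.eq_false_iff]
    intro hc
    obtain ⟨u, hu⟩ := (PySem.Chars.startswith_iff _ _).mp hc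
    rw [← ht] at hu
    simp at hu
  unfold pvIsImage
  rw [e1, e2]
  rfl

theorem foldA_true (lines : List String) : ∀ acc : List String,
    lines.foldl pvAStep (acc, true) =
      (acc ++ lines.filter (fun l => !pvIsImage l), true) := by
  induction lines with
  | nil => intro acc; simp
  | cons l rest ih =>
    intro acc
    by_cases him : pvIsImage l = true
    · have hor : (PySem.Str.startswith l "![" || PySem.Str.startswith l "[!") = true := him
      have hstep : pvAStep (acc, true) l = (acc, true) := by
        simp only [pvAStep, hor, reduceIte]
      simp only [List.foldl_cons, hstep, ih, List.filter_cons, him, Bool.not_true]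
      simp
    · have him' : pvIsImage l = false := by simpa using him
      have hor : (PySem.Str.startswith l "![" || PySem.Str.startswith l "[!") = false := him'
      rw [Bool.or_eq_false_iff] at hor
      have hstep : pvAStep (acc, true) l = (acc ++ [l], true) := by
        simp only [pvAStep, hor.1, hor.2, Bool.or_false, Bool.not_true, Bool.and_false]
        simp
      simp only [List.foldl_cons, hstep, ih, List.filter_cons, him', Bool.not_false]
      simp

theorem foldA_false (lines : List String) : ∀ acc : List String,
    lines.foldl pvAStep (acc, false) =
      (match lines.findIdx? pvGoodHeader with
        | none => (acc, false)
        | some i => (acc ++ (lines.drop i).filter (fun l => !pvIsImage l), true)) := by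
  induction lines with
  | nil => intro acc; simp
  | cons l rest ih =>
    intro acc
    by_cases hg : pvGoodHeader l = true
    · -- header found here: the flag flips, the line is kept, the rest runs in started mode
      have hgb : (PySem.Str.startswith l "## " &&
          !(["Table of", "目录", "Install", "Start", "License"].any
              (fun p => PySem.Str.isIn p l))) = true := hg
      rw [Bool.and_eq_true] at hgb
      have him : pvIsImage l = false := good_not_image l hgb.1
      have hor : (PySem.Str.startswith l "![" || PySem.Str.startswith l "[!") = false := him
      rw [Bool.or_eq_false_iff] at hor
      have hstep : pvAStep (acc, false) l = (acc ++ [l], true) := by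
        simp only [pvAStep, hor.1, hor.2, Bool.or_false, Bool.not_false, Bool.and_true,
          hgb.1, hgb.2]
        simp
      simp only [List.foldl_cons, hstep, foldA_true, List.findIdx?_cons, hg,
        List.drop_zero, List.filter_cons, him, Bool.not_false]
      simp [List.filter_cons, him]
    · have hg' : pvGoodHeader l = false := by simpa using hg
      have hstep : pvAStep (acc, false) l = (acc, false) := by
        by_cases him : pvIsImage l = true
        · have hor : (PySem.Str.startswith l "![" || PySem.Str.startswith l "[!") = true := him
          simp only [pvAStep, hor, reduceIte]
        · have him' : pvIsImage l = false := by simpa using him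
          have hor : (PySem.Str.startswith l "![" || PySem.Str.startswith l "[!") = false := him'
          rw [Bool.or_eq_false_iff] at hor
          have hgb : (PySem.Str.startswith l "## " &&
              !(["Table of", "目录", "Install", "Start", "License"].any
                  (fun p => PySem.Str.isIn p l))) = false := hg'
          rw [Bool.and_eq_false_iff] at hgb
          rcases hgb with hsf | hna
          · simp only [pvAStep, hor.1, hor.2, Bool.or_false, hsf, Bool.not_false,
              Bool.false_and]
            simp
          · have hany : (["Table of", "目录", "Install", "Start", "License"].any
                (fun p => PySem.Str.isIn p l)) = true := by
              cases hx : (["Table of", "目录", "Install", "Start", "License"].any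
                  (fun p => PySem.Str.isIn p l)) with
              | false => rw [hx] at hna; exact absurd hna (by decide)
              | true => rfl
            simp only [pvAStep, hor.1, hor.2, Bool.or_false, hany, Bool.not_true,
              Bool.not_false, Bool.and_true]
            simp
      simp only [List.foldl_cons, hstep, ih, List.findIdx?_cons, hg']
      cases hfi : rest.findIdx? pvGoodHeader with
      | none => simp
      | some i => simp

-- ===== VERDICT (by name: the statement is the Claim_ definition above) =====
theorem extract_core_content_py_spec : Claim_equal_extract_core_content_py := by
  intro readme_content _
  unfold Spec_extract_core_content_py extract_core_content_py extract_core_content_py_alt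
  simp only [foldA_false]
  cases hfi : ((PySem.Str.split? readme_content "\n").getD []).findIdx? pvGoodHeader with
  | none => show PySem.Str.join "\n" [] = ""; decide
  | some i => simp
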